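-- pv_equiv track=rewrite | github.com/anna-hope/signify | substring_parser.py | merge_successors
-- ===== SOURCE A (Python) =====
-- def merge_successors(strings):
--     """
--     Merges every string which is a prefix to one other string
--     :param strings:
--     :return:
--     """
--     to_remove = set()
--     for n, string in enumerate(strings):
--         same_beginnings = (s for s in strings if s.startswith(string)
--                            and s != string)
--         # count how many different successor letter there are after the following
--         successors = {s[len(string)] for s in same_beginnings}
--         # only merge if there is one successor
--         # e.g. tak -> taka but not k -> ka/ki
--         if len(successors) == 1:
--             to_remove.add(n)
--
--     # rebuild the list with only the 'merged' successor strings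
--     merged_strings = [string for n, string in enumerate(strings)
--                       if n not in to_remove]
--     return merged_strings
-- ===== SOURCE B (Python) =====
-- def merge_successors(strings):
--     # Hash-index approach: one pass builds, for every prefix that itself occurs
--     # in the list, the set of characters that follow it; no inner scan over strings.
--     present = set(strings)
--     succ = {}
--     for s in strings:
--         for i, ch in enumerate(s):
--             p = s[:i]
--             if p in present:
--                 succ.setdefault(p, set()).add(ch)
--     return [t for t in strings if len(succ.get(t, ())) != 1]
-- ===== Notes on version B (the rewrite author's own statement) =====
-- stated objective: faster
-- what changed: Instead of scanning the whole list for extensions of each string, B makes one pass that hash-indexes every prefix occurring in the list to its set of successor characters, then filters the list once.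
import Mathlib
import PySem

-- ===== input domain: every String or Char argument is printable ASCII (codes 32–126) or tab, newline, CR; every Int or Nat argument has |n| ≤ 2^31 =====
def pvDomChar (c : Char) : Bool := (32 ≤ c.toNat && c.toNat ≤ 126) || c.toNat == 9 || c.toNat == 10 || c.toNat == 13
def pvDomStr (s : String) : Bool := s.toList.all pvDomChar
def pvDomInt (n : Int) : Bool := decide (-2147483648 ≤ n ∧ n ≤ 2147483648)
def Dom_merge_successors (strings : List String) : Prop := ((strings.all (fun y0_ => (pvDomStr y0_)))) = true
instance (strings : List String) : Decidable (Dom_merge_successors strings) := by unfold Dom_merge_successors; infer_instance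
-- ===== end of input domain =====

-- B replaces A's scan of the whole list for extensions of each string by a single pass
-- that indexes every in-list prefix to its set of successor characters; equal return values proved.

-- ===== PORT A =====
-- literal transliteration of A: to_remove is the set of indices; successors is the set
-- comprehension over the generator (guard and indexing fused into one filterMap:
-- s[len(string)] is always in range when the guard holds, so pyGet? is some there)
def merge_successors (strings : List String) : List String :=
  let to_remove : PySem.Set Int :=
    (PySem.List.enumerate strings).foldl (fun tr p =>
      let successors : PySem.Set Char :=
        PySem.Set.ofList (strings.filterMap (fun s =>
          if PySem.Str.startswith s p.2 && s != p.2
          then PySem.Str.pyGet? s (PySem.Str.len p.2) else none))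
      if successors.length = 1 then PySem.Set.add tr p.1 else tr)
      PySem.Set.empty
  (PySem.List.enumerate strings).foldl (fun acc p =>
    if !(PySem.Set.contains to_remove p.1) then acc ++ [p.2] else acc) []

-- ===== PORT B =====
-- literal transliteration of Source B: present = set(strings); succ maps each in-list prefix
-- to the set of characters following it; setdefault(p,set()).add(ch) is
-- insert p ((getD p empty).add ch); final comprehension keeps len(succ.get(t,())) != 1
def merge_successors_alt (strings : List String) : List String :=
  let present : PySem.Set String := PySem.Set.ofList strings
  let succ : PySem.Dict String (PySem.Set Char) :=
    strings.foldl (fun d s =>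
      (PySem.List.enumerate s.toList).foldl (fun d ic =>
        let p := PySem.Str.slice s none (some ic.1)
        if PySem.Set.contains present p
        then d.insert p (PySem.Set.add (d.getD p PySem.Set.empty) ic.2)
        else d) d)
      PySem.Dict.empty
  strings.filter (fun t => !((succ.getD t PySem.Set.empty).length == 1))

-- abbreviations for the proof

-- ===== PRECONDITION & SPEC =====
def Spec_merge_successors (strings : List String) (out : List String) : Prop := out = merge_successors_alt strings
instance (strings : List String) (out : List String) : Decidable (Spec_merge_successors strings out) := by unfold Spec_merge_successors; infer_instance

-- ===== CLAIM (what is proved, stated in full; the proofs are below) =====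
def Claim_equal_merge_successors : Prop := ∀ (strings : List String), Dom_merge_successors strings → Spec_merge_successors strings (merge_successors strings)

-- ===== LEMMAS AND PROOFS =====

-- the successor characters of t in strings, in traversal order (shared characterisation)

def coreChars (strings : List String) (t : String) : List Char :=
  strings.filterMap (fun s =>
    if t.toList <+: s.toList ∧ t.toList.length < s.toList.length
    then s.toList[t.toList.length]? else none)

def removeB (strings : List String) (t : String) : Bool :=
  decide ((PySem.Set.ofList (coreChars strings t)).length = 1)

theorem cond_iff (s t : String) :
    (PySem.Str.startswith s t && s != t) =
      decide (t.toList <+: s.toList ∧ t.toList.length < s.toList.length) := by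
  have hlen : ∀ u : String, u.toList.length = u.length := fun u => by simp
  by_cases hp : t.toList <+: s.toList
  · have hsw : PySem.Chars.startswith s.toList t.toList = true :=
      (PySem.Chars.startswith_iff _ _).mpr hp
    have hle := hp.length_le
    by_cases hlt : t.toList.length < s.toList.length
    · have hne : ¬ s = t := by intro h; subst h; omega
      simp [hsw, hp, hne, hlen s ▸ hlen t ▸ hlt]
    · have heq : t.toList.length = s.toList.length := by omega
      have : t = s := String.toList_inj.mp (hp.eq_of_length heq)
      subst this
      simp [hlt]
  · have hsw : PySem.Chars.startswith s.toList t.toList = false := by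
      rw [Bool.eq_false_iff]
      intro h; exact hp ((PySem.Chars.startswith_iff _ _).mp h)
    simp [hsw, hp]

theorem coreChars_eq (strings : List String) (t : String) :
    strings.filterMap (fun s =>
      if PySem.Str.startswith s t && s != t
      then PySem.Str.pyGet? s (PySem.Str.len t) else none) = coreChars strings t := by
  unfold coreChars
  apply List.filterMap_congr
  intro s _
  rw [cond_iff]
  by_cases h : t.toList <+: s.toList ∧ t.toList.length < s.toList.length
  · simp only [h, decide_true, if_true, and_self]
    simp
  · simp [h]

theorem enum_filter_snd {α : Type} (xs : List α) (s : Int) (q : α → Bool) :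
    ((PySem.List.enumerate xs s).filter (fun p => q p.2)).map Prod.snd = xs.filter q := by
  induction xs generalizing s with
  | nil => simp [PySem.List.enumerate]
  | cons x xs ih =>
    rw [PySem.List.enumerate_cons]
    by_cases h : q x <;> simp [h, ih]

theorem A_eq (strings : List String) :
    merge_successors strings = strings.filter (fun t => !removeB strings t) := by
  unfold merge_successors
  simp only [coreChars_eq]
  rw [PySem.List.foldl_ite_eq_foldl_filter
    (p := fun p : Int × String => (PySem.Set.ofList (coreChars strings p.2)).length = 1)]
  rw [PySem.List.foldl_append_if]
  rw [List.nil_append]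
  rw [List.filter_congr (q := fun p : Int × String => !removeB strings p.2) ?_,
      enum_filter_snd (q := fun t => !removeB strings t)]
  intro p hp
  rcases (PySem.List.mem_enumerate_iff _ _ _).mp hp with ⟨k, hk, rfl⟩
  simp only [Bool.not_inj_iff]
  apply Bool.eq_iff_iff.mpr
  rw [PySem.Set.contains_iff]
  rw [PySem.Set.mem_foldl_add (f := fun p : Int × String => p.1)]
  simp only [List.mem_filter, PySem.Set.empty, List.not_mem_nil, false_or]
  constructor
  · rintro ⟨b, ⟨hb, hrb⟩, hbk⟩
    rcases (PySem.List.mem_enumerate_iff _ _ _).mp hb with ⟨j, hj, rfl⟩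
    simp only [zero_add] at hbk hrb ⊢
    have : j = k := by exact_mod_cast hbk.symm
    subst this
    simpa [removeB] using hrb
  · intro hr
    refine ⟨(0 + (k : Int), strings[k]), ⟨hp, ?_⟩, by simp⟩
    simpa [removeB] using hr

def hAct (s : String) (ic : Int × Char) : String × Char :=
  (PySem.Str.slice s none (some ic.1), ic.2)

def gAct (present : PySem.Set String) (d : PySem.Dict String (PySem.Set Char))
    (pc : String × Char) : PySem.Dict String (PySem.Set Char) :=
  if PySem.Set.contains present pc.1
  then d.insert pc.1 (PySem.Set.add (d.getD pc.1 PySem.Set.empty) pc.2)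
  else d

theorem foldl_flatMap' {α β γ : Type} (l : List α) (f : α → List β) (g : γ → β → γ)
    (init : γ) :
    (l.flatMap f).foldl g init = l.foldl (fun acc x => (f x).foldl g acc) init := by
  induction l generalizing init <;> simp [*]

theorem proj (present : PySem.Set String) (L : List (String × Char))
    (d : PySem.Dict String (PySem.Set Char)) (t : String) :
    (L.foldl (gAct present) d).getD t PySem.Set.empty
      = ((L.filter (fun pc => PySem.Set.contains present pc.1 && pc.1 == t)).map
          Prod.snd).foldl PySem.Set.add (d.getD t PySem.Set.empty) := by
  induction L generalizing d with
  | nil => rfl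
  | cons pc L ih =>
    simp only [List.foldl_cons, List.filter_cons]
    by_cases hc : PySem.Set.contains present pc.1
    · have hc' : pc.1 ∈ present := by simpa using hc
      by_cases he : pc.1 = t
      · rw [ih]
        subst he
        simp [gAct, hc, hc', PySem.Dict.getD_insert]
      · rw [ih]
        simp [gAct, hc, hc', he, PySem.Dict.getD_insert, Ne.symm he]
    · have hc' : ¬ pc.1 ∈ present := by
        intro hm; exact absurd ((PySem.Set.contains_iff _ _).mpr hm) hc
      rw [ih]
      simp [gAct, hc, hc']

-- per-string contribution to key t

theorem per_s (s t : String) :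
    ((((PySem.List.enumerate s.toList).map (hAct s)).filter
        (fun pc => pc.1 == t)).map Prod.snd)
      = (if t.toList <+: s.toList ∧ t.toList.length < s.toList.length
         then s.toList[t.toList.length]? else none).toList := by
  rw [PySem.List.enumerate_eq_map_pyRange s.toList 'A']
  rw [show PySem.List.len s.toList = ((s.toList.length : Nat) : Int) by simp]
  rw [PySem.List.pyRange_zero_natCast]
  simp only [List.map_map, List.filter_map]
  rw [List.filter_congr (q := fun k => decide (s.toList.take k = t.toList)) ?_]
  · by_cases hc : s.toList.take t.toList.length = t.toList
    · have hc' : List.take t.length s.toList = t.toList := by simpa using hc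
      have hfe : ∀ k ∈ List.range s.toList.length,
          decide (s.toList.take k = t.toList) = decide (k = t.toList.length) := by
        intro k hk
        have hkn : k < s.toList.length := List.mem_range.mp hk
        by_cases hkt : s.toList.take k = t.toList
        · have hke : k = t.toList.length := by
            have := congrArg List.length hkt
            simp only [List.length_take] at this
            omega
          subst hke
          simp [hc']
        · have hke : ¬ k = t.toList.length := by rintro rfl; exact hkt hc
          have hL : t.toList.length = t.length := by simp
          simp [hkt, hL ▸ hke]
      rw [List.filter_congr hfe, List.filter_eq, List.count_range]
      have hpre : t.toList <+: s.toList := List.prefix_iff_eq_take.mpr hc.symm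
      by_cases hm : t.toList.length < s.toList.length
      · simp only [hm, if_true, List.replicate_one, List.map_cons, List.map_nil]
        simp only [hpre, hm, and_self, if_true, Function.comp, hAct]
        rw [PySem.List.pyGetD_natCast, List.getElem?_eq_getElem hm]
        have hm' : t.length < s.toList.length := by simpa using hm
        simp [List.getElem?_eq_getElem hm']
      · have hm' : ¬ t.length < s.length := by simpa using hm
        simp [hm']
    · have hfe : ∀ k ∈ List.range s.toList.length,
          decide (s.toList.take k = t.toList) = (fun _ : Nat => false) k := by
        intro k hk
        have hkn : k < s.toList.length := List.mem_range.mp hk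
        by_cases hkt : s.toList.take k = t.toList
        · exfalso
          have hke : k = t.toList.length := by
            have := congrArg List.length hkt
            simp only [List.length_take] at this
            omega
          exact hc (hke ▸ hkt)
        · simp [hkt]
      rw [List.filter_congr hfe]
      have hpre' : ¬ t.toList <+: s.toList :=
        fun h => hc (List.prefix_iff_eq_take.mp h).symm
      simp [hpre']
  · intro k hk
    have hkn : k < s.toList.length := List.mem_range.mp hk
    have h1 : (PySem.Str.slice s none (some ((k : Nat) : Int))).toList
        = s.toList.take k := by
      rw [PySem.Str.toList_slice]; simp [PySem.List.slice_to_natCast]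
    simp only [Function.comp, hAct]
    by_cases hkt : s.toList.take k = t.toList
    · have hstr : PySem.Str.slice s none (some ((k:Nat):Int)) = t :=
        String.toList_inj.mp (h1.trans hkt)
      simp [hstr, hkt]
    · have hstr : ¬ PySem.Str.slice s none (some ((k:Nat):Int)) = t := by
        intro h; exact hkt (by rw [← h1, h])
      simp [hstr, hkt]

theorem filter_map_flatMap {α β γ : Type} (l : List α) (F : α → List β) (q : β → Bool)
    (f : β → γ) :
    ((l.flatMap F).filter q).map f = l.flatMap (fun x => ((F x).filter q).map f) := by
  induction l <;> simp [*, List.filter_append]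

theorem filterMap_eq_flatMap_toList {α β : Type} (l : List α) (f : α → Option β) :
    l.filterMap f = l.flatMap (fun x => (f x).toList) := by
  induction l with
  | nil => rfl
  | cons x l ih =>
    cases h : f x <;> simp [List.filterMap_cons, h, ih]

theorem B_eq (strings : List String) :
    merge_successors_alt strings = strings.filter (fun t => !removeB strings t) := by
  unfold merge_successors_alt
  show strings.filter _ = _
  apply List.filter_congr
  intro t ht
  have hfun : (fun (d : PySem.Dict String (PySem.Set Char)) (s : String) =>
        (PySem.List.enumerate s.toList).foldl (fun d ic =>
          let p := PySem.Str.slice s none (some ic.1)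
          if PySem.Set.contains (PySem.Set.ofList strings) p
          then d.insert p (PySem.Set.add (d.getD p PySem.Set.empty) ic.2)
          else d) d)
      = (fun d s => ((PySem.List.enumerate s.toList).map (hAct s)).foldl
          (gAct (PySem.Set.ofList strings)) d) := by
    funext d s
    rw [List.foldl_map]
    simp only [gAct, hAct]
  rw [hfun, ← foldl_flatMap', proj]
  rw [List.filter_congr (q := fun pc : String × Char => pc.1 == t) ?_]
  · rw [filter_map_flatMap]
    have hcong : ∀ s ∈ strings, (((PySem.List.enumerate s.toList).map (hAct s)).filter
        (fun pc => pc.1 == t)).map Prod.snd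
        = (if t.toList <+: s.toList ∧ t.toList.length < s.toList.length
           then s.toList[t.toList.length]? else none).toList := fun s _ => per_s s t
    rw [List.flatMap_congr ?hc]
    case hc => exact hcong
    rw [show (strings.flatMap (fun s =>
        (if t.toList <+: s.toList ∧ t.toList.length < s.toList.length
         then s.toList[t.toList.length]? else none).toList)) = coreChars strings t by
      rw [coreChars, filterMap_eq_flatMap_toList]]
    rw [PySem.Dict.getD_empty]
    rw [show (PySem.Set.empty : PySem.Set Char) = [] from rfl]
    rw [show ∀ l : List Char, l.foldl PySem.Set.add [] = PySem.Set.ofList l from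
      fun l => (PySem.Set.ofList_eq_foldl l).symm]
    simp only [removeB]
    by_cases h1 : (PySem.Set.ofList (coreChars strings t)).length = 1 <;> simp [h1]
  · intro pc _
    by_cases hb : pc.1 = t
    · subst hb
      have : PySem.Set.contains (PySem.Set.ofList strings) pc.1 = true :=
        (PySem.Set.contains_iff _ _).mpr ((PySem.Set.mem_ofList _ _).mpr ht)
      simp [ht]
    · simp [hb]

-- ===== VERDICT (by name: the statement is the Claim_ definition above) =====
theorem merge_successors_spec : Claim_equal_merge_successors := by
  intro strings _
  unfold Spec_merge_successors
  rw [A_eq, B_eq]
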